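-- pv_equiv track=rewrite | github.com/hws2002/taco_ai_workflow | analyze/embedding_processor.py | _merge_similar_keywords
-- ===== SOURCE A (Python) =====
-- from typing import Dict, List, Any, Tuple, Optional
--
-- def _merge_similar_keywords(keywords: List[str]) -> List[str]:
--     """
--     유사한 키워드 병합 (예: pip, pip37, pip pip -> pip)
--
--     Args:
--         keywords: 원본 키워드 리스트
--
--     Returns:
--         병합된 키워드 리스트
--     """
--     if not keywords:
--         return keywords
--
--     # 1. 중복 제거 (정확히 같은 것)
--     seen = set()
--     unique_kw = []
--     for kw in keywords:
--         if kw not in seen: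
--             seen.add(kw)
--             unique_kw.append(kw)
--
--     # 2. 부분 문자열 제거 (예: "pip"가 있으면 "pip37", "pip pip" 제거)
--     merged = []
--     for kw in unique_kw:
--         # 다른 키워드에 포함되지 않으면 추가
--         is_substring = False
--         for other_kw in unique_kw:
--             if kw != other_kw and kw in other_kw:
--                 is_substring = True
--                 break
--         if not is_substring:
--             merged.append(kw)
--
--     # 3. 공백 제거 (예: "pip pip" -> "pip")
--     final = []
--     for kw in merged:
--         # 공백으로 분리된 단어들이 모두 같으면 하나로 통일
--         words = kw.split()
--         if len(set(words)) == 1:  # 모든 단어가 같음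
--             final.append(words[0])
--         else:
--             final.append(kw)
--
--     # 4. 최종 중복 제거
--     final = list(dict.fromkeys(final))  # 순서 유지하며 중복 제거
--
--     return final
-- ===== SOURCE B (Python) =====
-- def _merge_similar_keywords(keywords):
--     # Process distinct keywords in decreasing length order, keeping only those not
--     # contained in an already-kept (hence strictly longer) keyword; containment is
--     # transitive, so comparing against kept keywords only is enough.
--     unique = list(dict.fromkeys(keywords))
--     kept = []
--     for kw in sorted(unique, key=len, reverse=True):
--         if not any(kw in o for o in kept):
--             kept.append(kw)
--     kept = set(kept)
--
--     def collapse(kw):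
--         ws = kw.split()
--         return ws[0] if ws and all(w == ws[0] for w in ws) else kw
--
--     return list(dict.fromkeys(collapse(kw) for kw in unique if kw in kept))
-- ===== Notes on version B (the rewrite author's own statement) =====
-- stated objective: faster
-- what changed: B replaces A's all-pairs substring scan by a sort: distinct keywords are processed in decreasing length order and a keyword is kept only if no already-kept (strictly longer, itself maximal) keyword contains it — correct because substring containment is transitive — then the kept set is read back in original order with the repeated-word collapse and final dedup fused into one pass.
import Mathlib
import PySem

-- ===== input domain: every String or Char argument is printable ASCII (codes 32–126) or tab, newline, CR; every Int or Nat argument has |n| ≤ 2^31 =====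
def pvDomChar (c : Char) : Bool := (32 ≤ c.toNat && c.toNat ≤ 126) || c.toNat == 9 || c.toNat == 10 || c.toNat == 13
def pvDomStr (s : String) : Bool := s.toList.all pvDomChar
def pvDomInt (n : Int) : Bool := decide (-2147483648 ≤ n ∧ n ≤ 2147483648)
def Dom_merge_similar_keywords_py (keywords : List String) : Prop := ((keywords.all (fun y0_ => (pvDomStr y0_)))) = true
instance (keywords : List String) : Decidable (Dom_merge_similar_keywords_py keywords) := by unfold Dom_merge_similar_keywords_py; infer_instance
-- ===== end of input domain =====

-- B replaces A's all-pairs substring scan: it processes the distinct keywords in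
-- decreasing length order and keeps a keyword only if no already-kept keyword contains
-- it (correct since substring containment is transitive), then reads the kept set back
-- in original order, collapsing repeated-word phrases and deduplicating in one pass.

-- ===== PORT A =====
-- words[0] is read only under len(set(words)) == 1, which forces words ≠ []; headD is exact there.
def pvCollapseA (kw : String) : String :=
  let words := PySem.Str.split₀ kw
  if (PySem.Set.ofList words).length = 1 then words.headD kw else kw

def merge_similar_keywords_py (keywords : List String) : List String :=
  if keywords = [] then keywords else
    let st := keywords.foldl (fun st kw =>
      if PySem.Set.contains st.1 kw then st
      else (PySem.Set.add st.1 kw, st.2 ++ [kw])) ((PySem.Set.empty : PySem.Set String), ([] : List String))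
    let unique_kw := st.2
    let merged := unique_kw.foldl (fun acc kw =>
      if unique_kw.any (fun o => kw != o && PySem.Str.isIn kw o) then acc else acc ++ [kw]) []
    let final := merged.foldl (fun acc kw => acc ++ [pvCollapseA kw]) []
    PySem.List.dedup final

-- ===== PORT B =====
def pvCollapseB (kw : String) : String :=
  match PySem.Str.split₀ kw with
  | [] => kw
  | w :: rest => if (w :: rest).all (fun x => x == w) then w else kw

def merge_similar_keywords_py_alt (keywords : List String) : List String :=
  let unique := PySem.List.dedup keywords
  let kept := (PySem.List.sorted unique (fun s => PySem.Str.len s) true).foldl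
      (fun acc kw => if acc.any (fun o => PySem.Str.isIn kw o) then acc else acc ++ [kw]) []
  let keptSet := PySem.Set.ofList kept
  PySem.List.dedup ((unique.filter (fun kw => PySem.Set.contains keptSet kw)).map pvCollapseB)

-- ===== PRECONDITION & SPEC =====
def Spec_merge_similar_keywords_py (keywords : List String) (out : List String) : Prop := out = merge_similar_keywords_py_alt keywords
instance (keywords : List String) (out : List String) : Decidable (Spec_merge_similar_keywords_py keywords out) := by unfold Spec_merge_similar_keywords_py; infer_instance

-- ===== CLAIM (what is proved, stated in full; the proofs are below) =====
def Claim_equal_merge_similar_keywords_py : Prop := ∀ (keywords : List String), Dom_merge_similar_keywords_py keywords → Spec_merge_similar_keywords_py keywords (merge_similar_keywords_py keywords)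

-- ===== LEMMAS AND PROOFS =====

-- 'kw is maximal in u': no member of u strictly longer than kw contains kw
def pvMaxKW (u : List String) (kw : String) : Prop :=
  ∀ o ∈ u, kw.toList <:+: o.toList → o.toList.length ≤ kw.toList.length

-- the two collapse helpers agree
theorem pv_collapse_eq (kw : String) : pvCollapseA kw = pvCollapseB kw := by
  unfold pvCollapseA pvCollapseB
  cases h : PySem.Str.split₀ kw with
  | nil => simp [PySem.Set.ofList_nil]
  | cons w rest =>
    dsimp only
    rw [PySem.Set.ofList_cons]
    by_cases hex : ∃ y ∈ rest, y ≠ w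
    · obtain ⟨y, hy, hyne⟩ := hex
      have hmem : y ∈ PySem.Set.discard (PySem.Set.ofList rest) w :=
        (PySem.Set.mem_discard _ _ _).mpr ⟨(PySem.Set.mem_ofList _ _).mpr hy, hyne⟩
      have hne : PySem.Set.discard (PySem.Set.ofList rest) w ≠ [] := by
        intro e; rw [e] at hmem; exact List.not_mem_nil hmem
      have hlen : (w :: PySem.Set.discard (PySem.Set.ofList rest) w).length ≠ 1 := by
        simp only [List.length_cons]
        intro e; exact hne (List.length_eq_zero_iff.mp (by omega))
      rw [if_neg hlen]
      have hfalse : (w :: rest).all (fun x => x == w) = false := by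
        simp only [List.all_eq_false]
        exact ⟨y, List.mem_cons_of_mem _ hy, by simpa using hyne⟩
      rw [hfalse, if_neg (by simp)]
    · have hall : ∀ x ∈ rest, x = w := by
        intro x hx; by_contra hne; exact hex ⟨x, hx, hne⟩
      have hd : PySem.Set.discard (PySem.Set.ofList rest) w = [] := by
        rw [List.eq_nil_iff_forall_not_mem]
        intro x hx
        have hm := (PySem.Set.mem_discard _ _ _).mp hx
        exact hm.2 (hall x ((PySem.Set.mem_ofList _ _).mp hm.1))
      have htrue : (w :: rest).all (fun x => x == w) = true := by
        simp only [List.all_eq_true, beq_iff_eq]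
        intro x hx
        rcases List.mem_cons.mp hx with h1 | h2
        · exact h1
        · exact hall x h2
      simp [hd, htrue]

-- A's filter test: an infix of a DIFFERENT string is an infix of a strictly LONGER one
theorem pv_pred_eq (kw o : String) :
    (kw != o && PySem.Str.isIn kw o)
      = (decide (kw.toList.length < o.toList.length) && PySem.Str.isIn kw o) := by
  cases h : PySem.Str.isIn kw o
  · simp
  · have hinf : kw.toList <:+: o.toList := (PySem.Str.isIn_iff_infix _ _).mp h
    have hle : kw.toList.length ≤ o.toList.length := hinf.length_le
    simp only [Bool.and_true]
    rcases Nat.lt_or_ge kw.toList.length o.toList.length with hlt | hge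
    · have hne : kw ≠ o := by
        intro e; subst e; omega
      rw [decide_eq_true hlt, bne_iff_ne.mpr hne]
    · have heq : kw = o := by
        have hl := List.IsInfix.eq_of_length hinf (Nat.le_antisymm hle hge)
        exact String.toList_inj.mp hl
      subst heq
      simp

-- A's first loop (seen-set + append) builds the ordered dedup
theorem pv_uniq_aux (l : List String) (s : PySem.Set String) :
    l.foldl (fun st kw =>
        if PySem.Set.contains st.1 kw then st
        else (PySem.Set.add st.1 kw, st.2 ++ [kw])) (s, s)
      = (PySem.Set.update s l, PySem.Set.update s l) := by
  induction l generalizing s with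
  | nil => simp [PySem.Set.update_nil]
  | cons x xs ih =>
    rw [List.foldl_cons, PySem.Set.update_cons]
    by_cases hx : x ∈ s
    · rw [if_pos ((PySem.Set.contains_iff _ _).mpr hx), PySem.Set.add_of_mem hx]
      exact ih s
    · rw [if_neg (by simp [hx])]
      rw [show s ++ [x] = PySem.Set.add s x from (PySem.Set.add_of_not_mem hx).symm]
      exact ih (PySem.Set.add s x)

theorem pv_uniq_eq (keywords : List String) :
    (keywords.foldl (fun st kw =>
        if PySem.Set.contains st.1 kw then st
        else (PySem.Set.add st.1 kw, st.2 ++ [kw]))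
      ((PySem.Set.empty : PySem.Set String), ([] : List String))).2
      = PySem.List.dedup keywords := by
  have h := pv_uniq_aux keywords PySem.Set.empty
  rw [show ((PySem.Set.empty : PySem.Set String), ([] : List String))
        = ((PySem.Set.empty : PySem.Set String), (PySem.Set.empty : PySem.Set String)) from rfl, h]
  simp [PySem.Set.update_nil_left]

-- any strictly longer container of kw in u can be replaced by a MAXIMAL one (by transitivity)
theorem pv_exists_max_container (u : List String) (kw o : String)
    (ho : o ∈ u) (hlt : kw.toList.length < o.toList.length) (hinf : kw.toList <:+: o.toList) :
    ∃ m ∈ u, kw.toList.length < m.toList.length ∧ kw.toList <:+: m.toList ∧ pvMaxKW u m := by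
  let S := u.filter (fun x =>
    decide (kw.toList.length < x.toList.length) && decide (kw.toList <:+: x.toList))
  have hoS : o ∈ S := List.mem_filter.mpr ⟨ho, by
    simp only [Bool.and_eq_true, decide_eq_true_eq]; exact ⟨hlt, hinf⟩⟩
  have hSne : S ≠ [] := by intro e; rw [e] at hoS; exact List.not_mem_nil hoS
  obtain ⟨m, hm⟩ : ∃ m, m ∈ S.argmax (fun x => x.toList.length) := by
    cases h : S.argmax (fun x => x.toList.length) with
    | none => exact absurd (List.argmax_eq_none.mp h) hSne
    | some m => exact ⟨m, Option.mem_def.mpr rfl⟩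
  have hmS : m ∈ S := List.argmax_mem hm
  obtain ⟨hmu, hmp⟩ := List.mem_filter.mp hmS
  simp only [Bool.and_eq_true, decide_eq_true_eq] at hmp
  refine ⟨m, hmu, hmp.1, hmp.2, ?_⟩
  intro p hp hinfp
  by_contra hlenp
  push Not at hlenp
  have hpS : p ∈ S := List.mem_filter.mpr ⟨hp, by
    simp only [Bool.and_eq_true, decide_eq_true_eq]
    exact ⟨by omega, hmp.2.trans hinfp⟩⟩
  exact List.not_lt_of_mem_argmax hpS hm hlenp

-- invariant of B's fold: processing in non-increasing length order, the accumulator is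
-- exactly the maximal keywords among those already processed
theorem pv_fold_inv (u : List String) (l acc : List String)
    (hpw : l.Pairwise (fun a b => b.toList.length ≤ a.toList.length))
    (hlu : ∀ x ∈ l, x ∈ u)
    (hnd : l.Nodup)
    (haccu : ∀ o ∈ acc, o ∈ u)
    (haccmax : ∀ o ∈ acc, pvMaxKW u o)
    (hcomp : ∀ o ∈ u, pvMaxKW u o → o ∉ l → o ∈ acc)
    (hdisj : ∀ o ∈ acc, o ∉ l)
    (hlong : ∀ o ∈ acc, ∀ x ∈ l, x.toList.length ≤ o.toList.length) :
    ∀ x, x ∈ l.foldl (fun acc kw =>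
        if acc.any (fun o => PySem.Str.isIn kw o) then acc else acc ++ [kw]) acc
      ↔ (x ∈ acc ∨ (x ∈ l ∧ pvMaxKW u x)) := by
  induction l generalizing acc with
  | nil => simp
  | cons kw t ih =>
    have hhd : ∀ b ∈ t, b.toList.length ≤ kw.toList.length := (List.pairwise_cons.mp hpw).1
    have hpt : t.Pairwise (fun a b => b.toList.length ≤ a.toList.length) :=
      (List.pairwise_cons.mp hpw).2
    have hndt : t.Nodup := (List.nodup_cons.mp hnd).2
    have hkwt : kw ∉ t := (List.nodup_cons.mp hnd).1
    rw [List.foldl_cons]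
    cases h : acc.any (fun o => PySem.Str.isIn kw o) with
    | true =>
      -- some kept (hence strictly longer) keyword contains kw: kw is not maximal
      obtain ⟨o₀, ho₀acc, ho₀⟩ := List.any_eq_true.mp h
      have hinf₀ : kw.toList <:+: o₀.toList := (PySem.Str.isIn_iff_infix _ _).mp ho₀
      have hne₀ : o₀ ≠ kw := by
        intro e; exact (hdisj o₀ ho₀acc) (e ▸ List.mem_cons_self)
      have hlen₀ : kw.toList.length < o₀.toList.length := by
        have hle := hlong o₀ ho₀acc kw List.mem_cons_self
        rcases Nat.lt_or_ge kw.toList.length o₀.toList.length with hlt | hge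
        · exact hlt
        · exact absurd (String.toList_inj.mp
            (hinf₀.eq_of_length (Nat.le_antisymm hinf₀.length_le hge)))
            (fun e => hne₀ e.symm)
      have hnmax : ¬ pvMaxKW u kw := by
        intro hmax
        have := hmax o₀ (haccu o₀ ho₀acc) hinf₀
        omega
      rw [if_pos rfl]
      intro x
      rw [ih acc hpt (fun y hy => hlu y (List.mem_cons_of_mem _ hy)) hndt haccu haccmax
        (fun o hou homax hot => by
          by_cases hol : o ∈ kw :: t
          · rcases List.mem_cons.mp hol with he | ht
            · exact absurd (he ▸ homax) hnmax
            · exact absurd ht hot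
          · exact hcomp o hou homax hol)
        (fun o ho => fun hmem => (hdisj o ho) (List.mem_cons_of_mem _ hmem))
        (fun o ho x hx => hlong o ho x (List.mem_cons_of_mem _ hx))]
      constructor
      · rintro (hx | ⟨hxt, hxm⟩)
        · exact Or.inl hx
        · exact Or.inr ⟨List.mem_cons_of_mem _ hxt, hxm⟩
      · rintro (hx | ⟨hxl, hxm⟩)
        · exact Or.inl hx
        · rcases List.mem_cons.mp hxl with he | ht
          · exact absurd (he ▸ hxm) hnmax
          · exact Or.inr ⟨ht, hxm⟩
    | false =>
      -- no kept keyword contains kw: kw is maximal in u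
      have hnone : ∀ o ∈ acc, PySem.Str.isIn kw o = false := by
        intro o ho
        simpa using List.any_eq_false.mp h o ho
      have hmax : pvMaxKW u kw := by
        intro o ho hinf
        by_contra hlen
        push Not at hlen
        obtain ⟨m, hmu, hmlen, hminf, hmmax⟩ := pv_exists_max_container u kw o ho hlen hinf
        have hml : m ∉ kw :: t := by
          intro hm
          rcases List.mem_cons.mp hm with he | ht
          · rw [he] at hmlen; omega
          · have := hhd m ht; omega
        have hmacc : m ∈ acc := hcomp m hmu hmmax hml
        have : PySem.Str.isIn kw m = true := (PySem.Str.isIn_iff_infix _ _).mpr hminf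
        rw [hnone m hmacc] at this
        exact Bool.false_ne_true this
      rw [if_neg Bool.false_ne_true]
      intro x
      rw [ih (acc ++ [kw]) hpt (fun y hy => hlu y (List.mem_cons_of_mem _ hy)) hndt
        (fun o ho => by
          rcases List.mem_append.mp ho with ha | hk
          · exact haccu o ha
          · rw [List.mem_singleton.mp hk]; exact hlu kw List.mem_cons_self)
        (fun o ho => by
          rcases List.mem_append.mp ho with ha | hk
          · exact haccmax o ha
          · rw [List.mem_singleton.mp hk]; exact hmax)
        (fun o hou homax hot => by
          by_cases hol : o ∈ kw :: t
          · rcases List.mem_cons.mp hol with he | ht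
            · exact List.mem_append.mpr (Or.inr (by rw [he]; exact List.mem_singleton_self _))
            · exact absurd ht hot
          · exact List.mem_append.mpr (Or.inl (hcomp o hou homax hol)))
        (fun o ho => by
          rcases List.mem_append.mp ho with ha | hk
          · exact fun hmem => (hdisj o ha) (List.mem_cons_of_mem _ hmem)
          · rw [List.mem_singleton.mp hk]; exact hkwt)
        (fun o ho x hx => by
          rcases List.mem_append.mp ho with ha | hk
          · exact hlong o ha x (List.mem_cons_of_mem _ hx)
          · rw [List.mem_singleton.mp hk]; exact hhd x hx)]
      simp only [List.mem_append, List.mem_cons, List.not_mem_nil, or_false]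
      constructor
      · rintro ((hx | he) | ⟨hxt, hxm⟩)
        · exact Or.inl hx
        · exact Or.inr ⟨Or.inl he, he ▸ hmax⟩
        · exact Or.inr ⟨Or.inr hxt, hxm⟩
      · rintro (hx | ⟨he | hxt, hxm⟩)
        · exact Or.inl (Or.inl hx)
        · exact Or.inl (Or.inr he)
        · exact Or.inr ⟨hxt, hxm⟩

-- B's kept list holds exactly the maximal distinct keywords
theorem pv_kept_mem (keywords : List String) (x : String) :
    x ∈ (PySem.List.sorted (PySem.List.dedup keywords) (fun s => PySem.Str.len s) true).foldl
        (fun acc kw => if acc.any (fun o => PySem.Str.isIn kw o) then acc else acc ++ [kw]) []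
      ↔ (x ∈ PySem.List.dedup keywords ∧ pvMaxKW (PySem.List.dedup keywords) x) := by
  have hpw : (PySem.List.sorted (PySem.List.dedup keywords) (fun s => PySem.Str.len s) true).Pairwise
      (fun a b => b.toList.length ≤ a.toList.length) := by
    refine (PySem.List.sorted_pairwise_rev (PySem.List.dedup keywords)
      (fun s => PySem.Str.len s)).imp ?_
    intro a b hab
    rw [PySem.Str.len_eq, PySem.Str.len_eq] at hab
    exact_mod_cast hab
  have h := pv_fold_inv (PySem.List.dedup keywords)
    (PySem.List.sorted (PySem.List.dedup keywords) (fun s => PySem.Str.len s) true) []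
    hpw
    (fun y hy => (PySem.List.mem_sorted _ _ _ _).mp hy)
    (((PySem.List.sorted_perm _ _ _).nodup_iff).mpr (PySem.List.nodup_dedup _))
    (fun o ho => absurd ho (List.not_mem_nil))
    (fun o ho => absurd ho (List.not_mem_nil))
    (fun o hou homax hns => absurd ((PySem.List.mem_sorted _ _ _ _).mpr hou) hns)
    (fun o ho => absurd ho (List.not_mem_nil))
    (fun o ho => absurd ho (List.not_mem_nil))
    x
  rw [h]
  simp [PySem.List.mem_sorted]

-- A's filter predicate says exactly 'maximal'
theorem pv_pred_kept (u : List String) (kw : String) :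
    (u.any (fun o => kw != o && PySem.Str.isIn kw o) = false) ↔ pvMaxKW u kw := by
  rw [show (fun o => kw != o && PySem.Str.isIn kw o)
        = (fun o => decide (kw.toList.length < o.toList.length) && PySem.Str.isIn kw o) from
      funext (pv_pred_eq kw)]
  rw [List.any_eq_false]
  constructor
  · intro h o ho hinf
    have h2 := h o ho
    simp only [Bool.and_eq_true, decide_eq_true_eq, not_and] at h2
    by_contra hlen
    exact h2 (by omega) ((PySem.Str.isIn_iff_infix _ _).mpr hinf)
  · intro h o ho
    simp only [Bool.and_eq_true, decide_eq_true_eq, not_and]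
    intro hlen hin
    have := h o ho ((PySem.Str.isIn_iff_infix _ _).mp hin)
    omega

-- ===== VERDICT (by name: the statement is the Claim_ definition above) =====
theorem merge_similar_keywords_py_spec : Claim_equal_merge_similar_keywords_py := by
  intro keywords _
  unfold Spec_merge_similar_keywords_py merge_similar_keywords_py merge_similar_keywords_py_alt
  by_cases hk : keywords = []
  · subst hk; rfl
  · rw [if_neg hk]
    simp only [pv_uniq_eq]
    rw [show (fun (acc : List String) kw =>
          if (PySem.List.dedup keywords).any (fun o => kw != o && PySem.Str.isIn kw o) then acc
          else acc ++ [kw])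
        = (fun (acc : List String) kw =>
          if !((PySem.List.dedup keywords).any (fun o => kw != o && PySem.Str.isIn kw o)) then acc ++ [kw]
          else acc) from by
      funext acc kw
      cases (PySem.List.dedup keywords).any (fun o => kw != o && PySem.Str.isIn kw o) <;> simp]
    rw [PySem.List.foldl_append_if_eq_filter, PySem.List.foldl_append_singleton_eq_map]
    simp only [List.nil_append]
    rw [show pvCollapseA = pvCollapseB from funext pv_collapse_eq]
    congr 1
    congr 1
    apply List.filter_congr
    intro kw hkw
    by_cases hm : pvMaxKW (PySem.List.dedup keywords) kw
    · have h1 := (pv_pred_kept (PySem.List.dedup keywords) kw).mpr hm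
      have hmem := (pv_kept_mem keywords kw).mpr ⟨hkw, hm⟩
      have hc : PySem.Set.contains (PySem.Set.ofList
          ((PySem.List.sorted (PySem.List.dedup keywords) (fun s => PySem.Str.len s) true).foldl
            (fun acc kw => if acc.any (fun o => PySem.Str.isIn kw o) then acc else acc ++ [kw]) []))
          kw = true :=
        (PySem.Set.contains_iff _ _).mpr ((PySem.Set.mem_ofList _ _).mpr hmem)
      rw [h1, hc]
      rfl
    · have h1 : (PySem.List.dedup keywords).any (fun o => kw != o && PySem.Str.isIn kw o) = true := by
        cases h : (PySem.List.dedup keywords).any (fun o => kw != o && PySem.Str.isIn kw o) with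
        | false => exact absurd ((pv_pred_kept (PySem.List.dedup keywords) kw).mp h) hm
        | true => rfl
      have hc : PySem.Set.contains (PySem.Set.ofList
          ((PySem.List.sorted (PySem.List.dedup keywords) (fun s => PySem.Str.len s) true).foldl
            (fun acc kw => if acc.any (fun o => PySem.Str.isIn kw o) then acc else acc ++ [kw]) []))
          kw = false := by
        cases hc2 : PySem.Set.contains (PySem.Set.ofList
            ((PySem.List.sorted (PySem.List.dedup keywords) (fun s => PySem.Str.len s) true).foldl
              (fun acc kw => if acc.any (fun o => PySem.Str.isIn kw o) then acc else acc ++ [kw]) []))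
            kw with
        | false => rfl
        | true =>
          exact absurd ((pv_kept_mem keywords kw).mp
            ((PySem.Set.mem_ofList _ _).mp ((PySem.Set.contains_iff _ _).mp hc2))).2 hm
      rw [h1, hc]
      rfl
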